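-- pv_equiv track=rewrite | github.com/Amelia-H-hub/travel-planner | backend/routers/events.py | compositions_with_min
-- ===== SOURCE A (Python) =====
-- def compositions_with_min(n, k, min_value=2):
--   if k == 1:
--     if n >= min_value:
--       yield [n]
--     return
--   # allocate at least min_value to each slot
--   n_remaining = n - min_value * k
--   if n_remaining < 0:
--     return
--   # generate nonnegative compositions of n_remaining into k parts, then add min_value
--   # Use stars-and-bars via recursive
--   def _rec(remaining, parts_left):
--     if parts_left == 1:
--       yield [remaining]
--       return
--     for i in range(remaining + 1):
--       for rest in _rec(remaining - i, parts_left - 1):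
--         yield [i] + rest
--
--   for base in _rec(n_remaining, k):
--     yield [x + min_value for x in base]
-- ===== SOURCE B (Python) =====
-- from itertools import combinations
--
-- def compositions_with_min(n, k, min_value=2):
--     if k == 1:
--         if n >= min_value:
--             yield [n]
--         return
--     n_remaining = n - min_value * k
--     if n_remaining < 0:
--         return
--     # stars and bars: choose k-1 divider positions among n_remaining + k - 1 slots;
--     # the gaps between consecutive dividers are the parts (plus min_value each)
--     total = n_remaining + k - 1
--     for dividers in combinations(range(total), k - 1):
--         prev = -1
--         parts = []
--         for c in list(dividers) + [total]:
--             parts.append(c - prev - 1 + min_value)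
--             prev = c
--         yield parts
-- ===== Notes on version B (the rewrite author's own statement) =====
-- stated objective: alternative
-- what changed: Replaces the nested recursive generator over part values by a stars-and-bars enumeration: itertools.combinations picks the k-1 divider positions and one linear pass turns each divider tuple into the part sizes, reproducing A's lexicographic order.
import Mathlib
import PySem

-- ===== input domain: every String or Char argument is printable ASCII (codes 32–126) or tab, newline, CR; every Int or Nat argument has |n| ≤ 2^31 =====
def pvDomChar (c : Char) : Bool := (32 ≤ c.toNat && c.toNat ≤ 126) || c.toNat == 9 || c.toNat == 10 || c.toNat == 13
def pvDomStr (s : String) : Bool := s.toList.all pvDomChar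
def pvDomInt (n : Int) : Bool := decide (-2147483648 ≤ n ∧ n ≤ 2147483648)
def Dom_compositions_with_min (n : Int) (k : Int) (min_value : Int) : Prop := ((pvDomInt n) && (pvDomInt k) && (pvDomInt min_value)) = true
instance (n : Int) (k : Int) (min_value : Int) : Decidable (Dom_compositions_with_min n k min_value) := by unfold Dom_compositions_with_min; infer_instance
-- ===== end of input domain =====

-- B replaces A's nested recursive generator by a stars-and-bars enumeration via
-- itertools.combinations (divider positions → gap sizes); same outputs in the same order.
-- Both versions are generators in Python; here they are ported as the list of yielded values.

-- ===== PORT A =====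
-- _rec(remaining, parts_left); the Nat fuel is parts_left (Pre_ guarantees parts_left >= 1;
-- in Python parts_left <= 0 never terminates, so the 0 case below is never reached on Pre_).
def pvRecA : Int → Nat → List (List Int)
  | _, 0 => []
  | remaining, 1 => [[remaining]]
  | remaining, (m+2) =>
      (PySem.List.pyRange 0 (remaining + 1) 1).flatMap
        (fun i => (pvRecA (remaining - i) (m+1)).map (fun rest => i :: rest))

def compositions_with_min (n : Int) (k : Int) (min_value : Int) : List (List Int) :=
  if k = 1 then (if n ≥ min_value then [[n]] else [])
  else
    let n_remaining := n - min_value * k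
    if n_remaining < 0 then []
    else (pvRecA n_remaining k.toNat).map (fun base => base.map (fun x => x + min_value))

-- ===== PORT B =====
-- itertools.combinations(l, r), in the lexicographic order itertools yields
-- (the `if` mirrors itertools' own initial `if r > n: return` shortcut; same output)
def pvCombos : List Int → Nat → List (List Int)
  | _, 0 => [[]]
  | [], _+1 => []
  | x :: xs, r+1 =>
      if xs.length < r then []
      else ((pvCombos xs r).map (fun c => x :: c)) ++ pvCombos xs (r+1)

-- the inner loop of B: successive gaps (c - prev - 1 + min_value), prev updated to c
def pvGapsFrom (min_value : Int) : Int → List Int → List Int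
  | _, [] => []
  | prev, c :: cs => (c - prev - 1 + min_value) :: pvGapsFrom min_value c cs

def compositions_with_min_alt (n : Int) (k : Int) (min_value : Int) : List (List Int) :=
  if k = 1 then (if n ≥ min_value then [[n]] else [])
  else
    let n_remaining := n - min_value * k
    if n_remaining < 0 then []
    else
      let total := n_remaining + k - 1
      (pvCombos (PySem.List.pyRange 0 total 1) (k-1).toNat).map
        (fun dividers => pvGapsFrom min_value (-1) (dividers ++ [total]))

-- ===== PRECONDITION & SPEC =====
-- Pre_ excludes exactly the inputs where A raises: for k ≤ 0 with n - min_value*k ≥ 0,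
-- A's _rec recurses forever (RecursionError); B raises ValueError there (combinations, r < 0).
def Pre_compositions_with_min (n : Int) (k : Int) (min_value : Int) : Prop :=
  1 ≤ k ∨ n - min_value * k < 0
instance (n : Int) (k : Int) (min_value : Int) : Decidable (Pre_compositions_with_min n k min_value) := by unfold Pre_compositions_with_min; infer_instance

def pvWitness_compositions_with_min : Int × Int × Int := (7, 3, 2)

def Spec_compositions_with_min (n : Int) (k : Int) (min_value : Int) (out : List (List Int)) : Prop := out = compositions_with_min_alt n k min_value
instance (n : Int) (k : Int) (min_value : Int) (out : List (List Int)) : Decidable (Spec_compositions_with_min n k min_value out) := by unfold Spec_compositions_with_min; infer_instance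

-- ===== CLAIM (what is proved, stated in full; the proofs are below) =====
def Claim_equal_compositions_with_min : Prop := ∀ (n : Int) (k : Int) (min_value : Int), Dom_compositions_with_min n k min_value → Pre_compositions_with_min n k min_value → Spec_compositions_with_min n k min_value (compositions_with_min n k min_value)

-- ===== LEMMAS AND PROOFS =====

-- add d to the first element (proof-only helper; d = stars already committed to the first part)
def pvAddFirst (d : Int) : List Int → List Int
  | [] => []
  | x :: r => (x + d) :: r

lemma pvCombos_short (l : List Int) : ∀ r, l.length < r → pvCombos l r = [] := by
  induction l with
  | nil =>
    intro r h
    cases r with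
    | zero => omega
    | succ r' => rfl
  | cons x xs ih =>
    intro r h
    cases r with
    | zero => omega
    | succ r' =>
      show (if xs.length < r' then _ else _) = _
      rw [if_pos (by simpa using h)]

lemma pvCombos_cons (x : Int) (xs : List Int) (r : Nat) :
    pvCombos (x :: xs) (r+1) = ((pvCombos xs r).map (fun c => x :: c)) ++ pvCombos xs (r+1) := by
  show (if xs.length < r then _ else _) = _
  by_cases h : xs.length < r
  · rw [if_pos h, pvCombos_short xs r h, pvCombos_short xs (r+1) (by omega)]
    rfl
  · rw [if_neg h]

lemma pvRecA_neg (r : Int) (m : Nat) (hr : r < 0) : pvRecA r (m+2) = [] := by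
  have h : PySem.List.pyRange 0 (r + 1) 1 = [] := by
    rw [PySem.List.pyRange_one]
    have : (r + 1 - 0).toNat = 0 := by omega
    rw [this]; rfl
  simp [pvRecA, h]

lemma pvRecA_succ_nat (u m : Nat) :
    pvRecA (u:Int) (m+2) = (List.range (u+1)).flatMap
      (fun i : Nat => (pvRecA ((u:Int) - (i:Int)) (m+1)).map (fun rest => ((i:Int) :: rest))) := by
  show (PySem.List.pyRange 0 ((u:Int) + 1) 1).flatMap _ = _
  rw [PySem.List.pyRange_one]
  have h : ((u:Int) + 1 - 0).toNat = u + 1 := by omega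
  rw [h, List.flatMap_map]
  simp

lemma pvAddFirst_zero (l : List Int) : pvAddFirst 0 l = l := by
  cases l <;> simp [pvAddFirst]

lemma pv_main (t : Nat) : ∀ (m : Nat) (o prev mv : Int),
    (pvCombos ((List.range t).map (fun j : Nat => (j:Int) + o)) m).map
        (fun dv => pvGapsFrom mv prev (dv ++ [(t:Int) + o]))
    = (pvRecA ((t:Int) - (m:Int)) (m+1)).map
        (fun l => pvAddFirst (o - prev - 1) (l.map (fun x => x + mv))) := by
  induction t with
  | zero =>
    intro m o prev mv
    cases m with
    | zero =>
      simp [pvCombos, pvGapsFrom, pvRecA, pvAddFirst]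
      ring
    | succ m =>
      have h1 : pvRecA (((0:Nat):Int) - (((m+1):Nat):Int)) (m+1+1) = [] :=
        pvRecA_neg _ m (by omega)
      rw [h1]
      simp [pvCombos]
  | succ t ih =>
    intro m o prev mv
    cases m with
    | zero =>
      simp [pvCombos, pvGapsFrom, pvRecA, pvAddFirst]
      ring
    | succ m =>
      -- position list: head o, tail shifted by one
      have hlist : (List.range (t+1)).map (fun j : Nat => (j:Int) + o)
          = o :: (List.range t).map (fun j : Nat => (j:Int) + (o+1)) := by
        rw [List.range_succ_eq_map, List.map_cons, List.map_map]
        simp only [Nat.cast_zero, zero_add]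
        refine congrArg _ ?_
        refine congrArg (fun f => List.map f (List.range t)) (funext fun j => ?_)
        simp [Function.comp]
        ring
      have hsent : (((t:Nat)+1:Nat):Int) + o = (t:Int) + (o+1) := by push_cast; ring
      rw [hlist]
      rw [pvCombos_cons, List.map_append, List.map_map]
      rw [show (((t+1:Nat)):Int) + o = (t:Int) + (o+1) from hsent]
      -- piece 1
      have p1 : (pvCombos ((List.range t).map (fun j : Nat => (j:Int) + (o+1))) m).map
            ((fun dv => pvGapsFrom mv prev (dv ++ [(t:Int) + (o+1)])) ∘ (fun c => o :: c))
          = ((pvRecA ((t:Int) - (m:Int)) (m+1)).map (fun l => l.map (fun x => x + mv))).map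
              (fun l => (o - prev - 1 + mv) :: l) := by
        have e1 : ((fun dv => pvGapsFrom mv prev (dv ++ [(t:Int) + (o+1)])) ∘ (fun c => o :: c))
            = (fun dv => (o - prev - 1 + mv) :: pvGapsFrom mv o (dv ++ [(t:Int) + (o+1)])) := by
          funext dv
          simp [Function.comp, pvGapsFrom]
        rw [e1]
        have e2 := ih m (o+1) o mv
        calc (pvCombos ((List.range t).map (fun j : Nat => (j:Int) + (o+1))) m).map
                (fun dv => (o - prev - 1 + mv) :: pvGapsFrom mv o (dv ++ [(t:Int) + (o+1)]))
            = ((pvCombos ((List.range t).map (fun j : Nat => (j:Int) + (o+1))) m).map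
                (fun dv => pvGapsFrom mv o (dv ++ [(t:Int) + (o+1)]))).map
                (fun l => (o - prev - 1 + mv) :: l) := by rw [List.map_map]; rfl
          _ = ((pvRecA ((t:Int) - (m:Int)) (m+1)).map
                (fun l => pvAddFirst ((o+1) - o - 1) (l.map (fun x => x + mv)))).map
                (fun l => (o - prev - 1 + mv) :: l) := by rw [e2]
          _ = _ := by
                simp [pvAddFirst_zero]
      rw [p1, ih (m+1) (o+1) prev mv]
      have hr : (((t:Nat)+1:Nat):Int) - ((((m:Nat)+1:Nat)):Int) = (t:Int) - (m:Int) := by push_cast; ring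
      rw [hr]
      rcases Nat.lt_or_ge t m with hlt | hge
      · have h0 : pvRecA ((t:Int) - (m:Int)) (m+1+1) = [] := pvRecA_neg _ m (by omega)
        have h2 : pvRecA ((t:Int) - (((m+1):Nat):Int)) (m+1+1) = [] := pvRecA_neg _ m (by omega)
        have h1 : pvRecA ((t:Int) - (m:Int)) (m+1) = [] := by
          cases m with
          | zero => exact absurd hlt (by omega)
          | succ m' => exact pvRecA_neg _ m' (by omega)
        rw [h0, h2, h1]; simp
      · obtain ⟨u, hu⟩ : ∃ u, t = m + u := ⟨t - m, by omega⟩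
        have hut : (t:Int) - (m:Int) = (u:Int) := by omega
        rw [hut, pvRecA_succ_nat u m, List.map_flatMap, List.range_succ_eq_map, List.flatMap_cons,
          List.flatMap_map]
        congr 1
        · simp only [Nat.cast_zero, sub_zero, List.map_map]
          refine congrArg (fun f => List.map f _) (funext fun l => ?_)
          simp [Function.comp, pvAddFirst]
          ring
        · rcases u with _ | u'
          · have h3 : pvRecA ((t:Int) - (((m+1):Nat):Int)) (m+1+1) = [] :=
              pvRecA_neg _ m (by omega)
            rw [h3]; simp
          · have h4 : (t:Int) - (((m+1):Nat):Int) = (u':Int) := by omega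
            rw [h4, pvRecA_succ_nat u' m, List.map_flatMap]
            refine congrArg (fun f => List.flatMap f (List.range (u'+1))) (funext fun i => ?_)
            have h5 : ((u'+1:Nat):Int) - ((Nat.succ i : Nat):Int) = (u':Int) - (i:Int) := by
              push_cast; ring
            rw [h5, List.map_map, List.map_map]
            refine congrArg (fun f => List.map f _) (funext fun l => ?_)
            simp [Function.comp, pvAddFirst]
            ring

-- ===== VERDICT (by name: the statement is the Claim_ definition above) =====
theorem compositions_with_min_spec : Claim_equal_compositions_with_min := by
  unfold Claim_equal_compositions_with_min
  intro n k mv hdom hpre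
  unfold Spec_compositions_with_min compositions_with_min compositions_with_min_alt
  by_cases hk1 : k = 1
  · simp [hk1]
  · simp only [if_neg hk1]
    by_cases hnr : n - mv * k < 0
    · simp [hnr]
    · simp only [if_neg hnr]
      rw [Int.not_lt] at hnr
      have hk : 1 ≤ k := by
        rcases hpre with h | h
        · exact h
        · omega
      set nr := n - mv * k with hnrdef
      set total := nr + k - 1 with htot
      have hlist : PySem.List.pyRange 0 total 1
          = (List.range total.toNat).map (fun j : Nat => (j:Int) + 0) := by
        rw [PySem.List.pyRange_one]
        rw [show total - 0 = total from by ring]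
        refine congrArg (fun f => List.map f (List.range total.toNat)) (funext fun j => ?_)
        ring
      have key := pv_main total.toNat ((k-1).toNat) 0 (-1) mv
      rw [show ((total.toNat:Nat):Int) + 0 = total from by omega] at key
      rw [show ((total.toNat:Nat):Int) - (((k-1).toNat:Nat):Int) = nr from by omega] at key
      rw [show (k-1).toNat + 1 = k.toNat from by omega] at key
      rw [hlist, key]
      refine congrArg (fun f => List.map f (pvRecA nr k.toNat)) (funext fun l => ?_)
      rw [show (0:Int) - (-1) - 1 = 0 from by ring, pvAddFirst_zero]
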